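-- pv_equiv track=rewrite | github.com/Xianzheng/teaching | Jingxue_CCC/20231124.py | checkTable
-- ===== SOURCE A (Python) =====
-- def checkTable(table):
--     '''
--     parameter: table is two Dimensional list
--
--     each row should be in order(from small to big)
--     each column shoube in order(from small to big)
--     if it is return True
--     else return False
--     '''
--     # check if eachRow is inorder
--     for eachRow in table:
--        if eachRow != sorted(eachRow):
--            return False
--
--     tempTable = []
--     for i in range(3):
--         lst = []
--         for j in range(3):
--             lst.append(table[j][i])
--         tempTable.append(lst)
--
--     for eachRow in tempTable:
--        if eachRow != sorted(eachRow):
--            return False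
--
--     return True
-- ===== SOURCE B (Python) =====
-- def checkTable(table):
--     for row in table:
--         for x, y in zip(row, row[1:]):
--             if x > y:
--                 return False
--     for i in range(3):
--         for j in range(2):
--             if table[j][i] > table[j+1][i]:
--                 return False
--     return True
-- ===== Notes on version B (the rewrite author's own statement) =====
-- stated objective: simpler
-- what changed: B replaces A's sort-and-compare on every row and on an explicitly built 3x3 transpose by direct adjacent-pair comparisons (row[c] <= row[c+1] and table[j][i] <= table[j+1][i]), dropping the sorting and the temporary transposed table entirely.
-- outside the precondition, e.g. on checkTable([[1], [-1], [3], []]): A raises IndexError, B returns False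
import Mathlib
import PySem

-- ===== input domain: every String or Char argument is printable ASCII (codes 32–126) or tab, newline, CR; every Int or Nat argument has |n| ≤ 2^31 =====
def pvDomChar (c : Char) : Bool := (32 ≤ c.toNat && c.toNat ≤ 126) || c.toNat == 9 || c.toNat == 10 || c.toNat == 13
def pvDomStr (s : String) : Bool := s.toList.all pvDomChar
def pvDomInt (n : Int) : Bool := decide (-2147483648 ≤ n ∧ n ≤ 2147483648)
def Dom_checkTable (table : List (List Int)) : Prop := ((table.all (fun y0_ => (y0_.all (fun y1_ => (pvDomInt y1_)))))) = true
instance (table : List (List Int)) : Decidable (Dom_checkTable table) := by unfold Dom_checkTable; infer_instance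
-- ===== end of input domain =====

-- B drops A's sort-and-compare and its explicit 3x3 transpose: rows and columns are
-- checked by adjacent-pair comparisons directly on the input (objective: simpler).

-- table[j][i]; the 0 default is reached only outside Pre_checkTable (where Python raises IndexError)
def pvGet (table : List (List Int)) (j i : Int) : Int :=
  (PySem.List.pyGet? ((PySem.List.pyGet? table j).getD []) i).getD 0

-- ===== PORT A =====
-- 'for eachRow in t: if eachRow != sorted(eachRow): return False' as structural recursion
def pvRowsSortedA : List (List Int) → Bool
  | [] => true
  | r :: rs => if r ≠ PySem.List.sorted r (fun x => x) false then false else pvRowsSortedA rs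

def checkTable (table : List (List Int)) : Bool :=
  if pvRowsSortedA table = false then false
  else
    -- tempTable built by the two nested range(3) loops
    pvRowsSortedA ((PySem.List.pyRange 0 3 1).map (fun i =>
      (PySem.List.pyRange 0 3 1).map (fun j => pvGet table j i)))

-- ===== PORT B =====
-- 'for x, y in zip(row, row[1:]): if x > y: return False'
def pvRowOkB (r : List Int) : Bool := (r.zip r.tail).all (fun p => decide (p.1 ≤ p.2))

def checkTable_alt (table : List (List Int)) : Bool :=
  if table.all pvRowOkB = false then false
  else
    (PySem.List.pyRange 0 3 1).all (fun i =>
      (PySem.List.pyRange 0 2 1).all (fun j => decide (pvGet table j i ≤ pvGet table (j + 1) i)))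

-- ===== PRECONDITION & SPEC =====
-- Pre_ excludes exactly the inputs where Python A raises IndexError: all rows already
-- nondecreasing but the table lacks 3 rows, or one of the first 3 rows lacks 3 entries.
def Pre_checkTable (table : List (List Int)) : Prop :=
  (∃ r ∈ table, ¬ r.Pairwise (· ≤ ·)) ∨
  (3 ≤ table.length ∧ ∀ r ∈ table.take 3, 3 ≤ r.length)
instance (table : List (List Int)) : Decidable (Pre_checkTable table) := by
  unfold Pre_checkTable; infer_instance

def pvWitness_checkTable : List (List Int) := [[1, 2, 3], [2, 3, 4], [3, 4, 5]]

def Spec_checkTable (table : List (List Int)) (out : Bool) : Prop := out = checkTable_alt table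
instance (table : List (List Int)) (out : Bool) : Decidable (Spec_checkTable table out) := by
  unfold Spec_checkTable; infer_instance

-- ===== CLAIM (what is proved, stated in full; the proofs are below) =====
def Claim_equal_checkTable : Prop :=
  ∀ (table : List (List Int)), Dom_checkTable table → Pre_checkTable table →
    Spec_checkTable table (checkTable table)

-- ===== LEMMAS AND PROOFS =====

lemma pairwise_cons_cons (a b : Int) (t : List Int) :
    List.Pairwise (· ≤ ·) (a :: b :: t) ↔ a ≤ b ∧ List.Pairwise (· ≤ ·) (b :: t) := by
  simp only [List.pairwise_cons, List.mem_cons]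
  constructor
  · rintro ⟨h1, h2, h3⟩
    exact ⟨h1 b (Or.inl rfl), h2, h3⟩
  · rintro ⟨hab, h2, h3⟩
    refine ⟨fun y hy => ?_, h2, h3⟩
    rcases hy with rfl | hy
    · exact hab
    · exact le_trans hab (h2 y hy)

lemma rowOkB_cons_cons (a b : Int) (t : List Int) :
    pvRowOkB (a :: b :: t) = (decide (a ≤ b) && pvRowOkB (b :: t)) := rfl

lemma rowOkB_iff_pairwise (r : List Int) : pvRowOkB r = true ↔ r.Pairwise (· ≤ ·) := by
  induction r with
  | nil => simp [pvRowOkB]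
  | cons a t ih =>
    cases t with
    | nil => simp [pvRowOkB]
    | cons b t' =>
      rw [rowOkB_cons_cons, pairwise_cons_cons, Bool.and_eq_true, decide_eq_true_eq]
      exact and_congr_right fun _ => ih

lemma sorted_id_eq_iff_pairwise (r : List Int) :
    r = PySem.List.sorted r (fun x => x) false ↔ r.Pairwise (· ≤ ·) := by
  constructor
  · intro h
    have hp := PySem.List.sorted_pairwise r (fun x => x)
    rw [← h] at hp
    exact hp
  · intro h
    exact (PySem.List.sorted_eq_self_of_pairwise r (fun x => x) (by simpa using h)).symm

lemma rowsSortedA_eq_all (ts : List (List Int)) : pvRowsSortedA ts = ts.all pvRowOkB := by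
  induction ts with
  | nil => rfl
  | cons r rs ih =>
    simp only [pvRowsSortedA, List.all_cons]
    by_cases h : r.Pairwise (· ≤ ·)
    · have he : r = PySem.List.sorted r (fun x => x) false :=
        (sorted_id_eq_iff_pairwise r).mpr h
      rw [if_neg (fun hc => hc he), (rowOkB_iff_pairwise r).mpr h, Bool.true_and, ih]
    · rw [if_pos, Bool.and_eq_false_iff.mpr]
      · left
        exact Bool.not_eq_true _ ▸ fun hc => h ((rowOkB_iff_pairwise r).mp hc)
      · intro hc
        exact h ((sorted_id_eq_iff_pairwise r).mp hc)

lemma sorted3_iff (a b c : Int) :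
    [a, b, c] = PySem.List.sorted [a, b, c] (fun x => x) false ↔ a ≤ b ∧ b ≤ c := by
  rw [sorted_id_eq_iff_pairwise, pairwise_cons_cons, pairwise_cons_cons]
  simp

lemma range3 : PySem.List.pyRange 0 3 1 = [0, 1, 2] := by decide
lemma range2 : PySem.List.pyRange 0 2 1 = [0, 1] := by decide

lemma cols_eq (table : List (List Int)) :
    pvRowsSortedA ((PySem.List.pyRange 0 3 1).map (fun i =>
      (PySem.List.pyRange 0 3 1).map (fun j => pvGet table j i))) =
    (PySem.List.pyRange 0 3 1).all (fun i =>
      (PySem.List.pyRange 0 2 1).all (fun j => decide (pvGet table j i ≤ pvGet table (j + 1) i))) := by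
  rw [range3, range2]
  by_cases p1 : pvGet table 0 0 ≤ pvGet table 1 0 <;>
  by_cases p2 : pvGet table 1 0 ≤ pvGet table 2 0 <;>
  by_cases p3 : pvGet table 0 1 ≤ pvGet table 1 1 <;>
  by_cases p4 : pvGet table 1 1 ≤ pvGet table 2 1 <;>
  by_cases p5 : pvGet table 0 2 ≤ pvGet table 1 2 <;>
  by_cases p6 : pvGet table 1 2 ≤ pvGet table 2 2 <;>
  simp [pvRowsSortedA, sorted3_iff, p1, p2, p3, p4, p5, p6]

-- ===== VERDICT (by name: the statement is the Claim_ definition above) =====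
theorem checkTable_spec : Claim_equal_checkTable := by
  intro table _ _
  unfold Spec_checkTable checkTable checkTable_alt
  rw [rowsSortedA_eq_all, cols_eq]
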